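-- pv_equiv track=rewrite | github.com/ph7klw76/Data_science_project | extractorbitalsintoexcel.py | extract_lumo_extended
-- ===== SOURCE A (Python) =====
-- def extract_lumo_extended(file_contents):
--     """
--     Extracts the HOMO, LUMO, HOMO-1, HOMO-2, LUMO+1, and LUMO+2 data from the given file content.
--     """
--     lines = file_contents.split("\n")
--     homo = lumo = homo_1 = homo_2 = lumo_1 = lumo_2 = None
--     occ_2_counter = 0
--     occ_0_counter = 0
--
--     for line in lines:
--         parts = line.split()
--         if len(parts) == 4:
--             occ = parts[1]
--             e_ev = parts[3]
--
--             if occ == '2.0000':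
--                 occ_2_counter += 1
--                 if occ_2_counter == 1:
--                     homo = e_ev
--                 elif occ_2_counter == 2:
--                     homo_1 = e_ev
--                 elif occ_2_counter == 3:
--                     homo_2 = e_ev
--
--             elif occ == '0.0000':
--                 occ_0_counter += 1
--                 if occ_0_counter == 1:
--                     lumo = e_ev
--                 elif occ_0_counter == 2:
--                     lumo_1 = e_ev
--                 elif occ_0_counter == 3:
--                     lumo_2 = e_ev
--
--     return lumo, lumo_1, lumo_2
-- ===== SOURCE B (Python) =====
-- def extract_lumo_extended(file_contents):
--     """Repeatedly find the next unoccupied-orbital line, stopping after the third match."""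
--     def find_next(lines):
--         for i, line in enumerate(lines):
--             p = line.split()
--             if len(p) == 4 and p[1] == '0.0000':
--                 return p[3], lines[i + 1:]
--         return None, []
--     rest = file_contents.split("\n")
--     lumo, rest = find_next(rest)
--     lumo_1, rest = find_next(rest)
--     lumo_2, _ = find_next(rest)
--     return lumo, lumo_1, lumo_2
-- ===== Notes on version B (the rewrite author's own statement) =====
-- stated objective: simpler
-- what changed: Replaced the full-pass two-counter branch cascade (with dead HOMO bookkeeping) by three rounds of a find-next-match search that stops scanning as soon as the third unoccupied-orbital line is found.
import Mathlib
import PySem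

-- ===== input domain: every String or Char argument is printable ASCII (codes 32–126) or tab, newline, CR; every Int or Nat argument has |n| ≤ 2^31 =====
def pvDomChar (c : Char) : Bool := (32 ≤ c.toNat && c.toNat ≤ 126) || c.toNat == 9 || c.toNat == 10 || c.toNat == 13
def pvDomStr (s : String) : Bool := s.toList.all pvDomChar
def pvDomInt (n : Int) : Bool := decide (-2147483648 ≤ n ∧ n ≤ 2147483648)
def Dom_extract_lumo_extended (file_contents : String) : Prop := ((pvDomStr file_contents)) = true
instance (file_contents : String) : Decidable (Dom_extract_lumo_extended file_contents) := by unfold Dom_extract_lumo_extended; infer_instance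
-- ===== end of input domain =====

-- B replaces A's full-pass two-counter branch cascade (with dead HOMO bookkeeping) by three
-- rounds of a find-next-match search that stops after the third unoccupied line; same result.

-- ===== PORT A =====
structure LState where
  homo : Option String
  homo1 : Option String
  homo2 : Option String
  lumo : Option String
  lumo1 : Option String
  lumo2 : Option String
  occ2 : Nat
  occ0 : Nat
deriving Repr, DecidableEq

def stepA (st : LState) (line : String) : LState :=
  let parts := PySem.Str.split₀ line
  if parts.length == 4 then
    let occ := (PySem.List.pyGet? parts 1).getD ""
    let e_ev := (PySem.List.pyGet? parts 3).getD ""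
    if occ == "2.0000" then
      let c := st.occ2 + 1
      { st with occ2 := c
                homo  := if c == 1 then some e_ev else st.homo
                homo1 := if c == 2 then some e_ev else st.homo1
                homo2 := if c == 3 then some e_ev else st.homo2 }
    else if occ == "0.0000" then
      let c := st.occ0 + 1
      { st with occ0 := c
                lumo  := if c == 1 then some e_ev else st.lumo
                lumo1 := if c == 2 then some e_ev else st.lumo1
                lumo2 := if c == 3 then some e_ev else st.lumo2 }
    else st
  else st

def extract_lumo_extended (file_contents : String) : Option String × Option String × Option String :=
  let lines := (PySem.Str.split? file_contents "\n").getD []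
  let st := lines.foldl stepA ⟨none, none, none, none, none, none, 0, 0⟩
  (st.lumo, st.lumo1, st.lumo2)

-- ===== PORT B =====
-- Source B's inner 'find_next': scan for the first 4-token line with second field '0.0000',
-- return its fourth field and the lines after it (the enumerate-plus-slice loop becomes
-- the obvious structural recursion over the same list).
def findNext : List String → Option String × List String
  | [] => (none, [])
  | l :: rest =>
    let p := PySem.Str.split₀ l
    if p.length == 4 && PySem.List.pyGet? p 1 == some "0.0000" then
      (some ((PySem.List.pyGet? p 3).getD ""), rest)
    else findNext rest

def extract_lumo_extended_alt (file_contents : String) : Option String × Option String × Option String :=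
  let rest0 := (PySem.Str.split? file_contents "\n").getD []
  let r1 := findNext rest0
  let r2 := findNext r1.2
  let r3 := findNext r2.2
  (r1.1, r2.1, r3.1)

-- ===== PRECONDITION & SPEC =====
def Spec_extract_lumo_extended (file_contents : String) (out : Option String × Option String × Option String) : Prop := out = extract_lumo_extended_alt file_contents
instance (file_contents : String) (out : Option String × Option String × Option String) : Decidable (Spec_extract_lumo_extended file_contents out) := by unfold Spec_extract_lumo_extended; infer_instance

-- ===== CLAIM (what is proved, stated in full; the proofs are below) =====
def Claim_equal_extract_lumo_extended : Prop := ∀ (file_contents : String), Dom_extract_lumo_extended file_contents → Spec_extract_lumo_extended file_contents (extract_lumo_extended file_contents)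

-- ===== LEMMAS AND PROOFS =====

-- the '0.0000' / '2.0000' energies of a line, used only to state the invariants
def lineEnergy (line : String) : Option String :=
  let p := PySem.Str.split₀ line
  if p.length == 4 && PySem.List.pyGet? p 1 == some "0.0000" then PySem.List.pyGet? p 3 else none

def lineEnergyH (line : String) : Option String :=
  let p := PySem.Str.split₀ line
  if p.length == 4 && PySem.List.pyGet? p 1 == some "2.0000" then PySem.List.pyGet? p 3 else none

lemma length_eq_four {α : Type} {xs : List α} (h : xs.length = 4) :
    ∃ a b c d, xs = [a, b, c, d] := by
  match xs, h with
  | [a, b, c, d], _ => exact ⟨a, b, c, d, rfl⟩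

lemma getElem?_append_single {α : Type} (E : List α) (x : α) (i : Nat) :
    (E ++ [x])[i]? = if i = E.length then some x else E[i]? := by
  rcases lt_trichotomy i E.length with h | h | h
  · rw [List.getElem?_append_left h]; simp [Nat.ne_of_lt h]
  · subst h; simp
  · have h1 : E[i]? = none := List.getElem?_eq_none (by omega)
    have h2 : (E ++ [x])[i]? = none := List.getElem?_eq_none (by simp; omega)
    simp [h1, h2, Nat.ne_of_gt h]

lemma lineEnergy_eq (l a b c d : String) (he : PySem.Str.split₀ l = [a, b, c, d]) :
    lineEnergy l = if b = "0.0000" then some d else none := by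
  simp [lineEnergy, he, PySem.List.pyGet?, PySem.List.pyIdx?]

lemma lineEnergyH_eq (l a b c d : String) (he : PySem.Str.split₀ l = [a, b, c, d]) :
    lineEnergyH l = if b = "2.0000" then some d else none := by
  simp [lineEnergyH, he, PySem.List.pyGet?, PySem.List.pyIdx?]

lemma stepA_eq (st : LState) (l a b c d : String) (he : PySem.Str.split₀ l = [a, b, c, d]) :
    stepA st l =
      if b = "2.0000" then
        { st with occ2 := st.occ2 + 1
                  homo  := if st.occ2 + 1 = 1 then some d else st.homo
                  homo1 := if st.occ2 + 1 = 2 then some d else st.homo1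
                  homo2 := if st.occ2 + 1 = 3 then some d else st.homo2 }
      else if b = "0.0000" then
        { st with occ0 := st.occ0 + 1
                  lumo  := if st.occ0 + 1 = 1 then some d else st.lumo
                  lumo1 := if st.occ0 + 1 = 2 then some d else st.lumo1
                  lumo2 := if st.occ0 + 1 = 3 then some d else st.lumo2 }
      else st := by
  norm_num [stepA, he, PySem.List.pyGet?, PySem.List.pyIdx?, show Int.toNat 3 = 3 from rfl]

lemma foldl_stepA (ls : List String) :
    ls.foldl stepA ⟨none, none, none, none, none, none, 0, 0⟩ =
      ⟨(ls.filterMap lineEnergyH)[0]?, (ls.filterMap lineEnergyH)[1]?, (ls.filterMap lineEnergyH)[2]?,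
       (ls.filterMap lineEnergy)[0]?, (ls.filterMap lineEnergy)[1]?, (ls.filterMap lineEnergy)[2]?,
       (ls.filterMap lineEnergyH).length, (ls.filterMap lineEnergy).length⟩ := by
  induction ls using List.reverseRecOn with
  | nil => rfl
  | append_singleton ls l ih =>
    rw [List.foldl_append, ih]
    simp only [List.foldl_cons, List.foldl_nil, List.filterMap_append,
      List.filterMap_cons, List.filterMap_nil]
    by_cases h4 : (PySem.Str.split₀ l).length = 4
    · obtain ⟨a, b, c, d, he⟩ := length_eq_four h4
      rw [stepA_eq _ l a b c d he, lineEnergy_eq l a b c d he, lineEnergyH_eq l a b c d he]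
      by_cases h2 : b = "2.0000"
      · have hb0 : ¬ b = "0.0000" := by subst h2; decide
        simp only [if_pos h2, if_neg hb0, List.append_nil, LState.mk.injEq,
          getElem?_append_single, List.length_append, List.length_cons, List.length_nil]
        refine ⟨?_, ?_, ?_, ?_, ?_, ?_, ?_, ?_⟩ <;>
          first | rfl | trivial | omega | (split_ifs <;> (try rfl) <;> omega)
      · by_cases h0 : b = "0.0000"
        · simp only [if_neg h2, if_pos h0, List.append_nil, LState.mk.injEq,
            getElem?_append_single, List.length_append, List.length_cons, List.length_nil]
          refine ⟨?_, ?_, ?_, ?_, ?_, ?_, ?_, ?_⟩ <;>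
            first | rfl | trivial | omega | (split_ifs <;> (try rfl) <;> omega)
        · simp [h2, h0]
    · have h1 : lineEnergy l = none := by
        simp [lineEnergy]; intro h; exact absurd h h4
      have h2 : lineEnergyH l = none := by
        simp [lineEnergyH]; intro h; exact absurd h h4
      simp [stepA, h4, h1, h2]

lemma findNext_spec (ls : List String) :
    (findNext ls).1 = (ls.filterMap lineEnergy).head? ∧
    (findNext ls).2.filterMap lineEnergy = (ls.filterMap lineEnergy).tail := by
  induction ls with
  | nil => exact ⟨rfl, rfl⟩
  | cons l rest ih =>
    by_cases hc : (PySem.Str.split₀ l).length = 4 ∧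
        PySem.List.pyGet? (PySem.Str.split₀ l) 1 = some "0.0000"
    · obtain ⟨a, b, c, d, he⟩ := length_eq_four hc.1
      have hb : b = "0.0000" := by
        have := hc.2
        simp [he, PySem.List.pyGet?, PySem.List.pyIdx?] at this
        exact this
      have hE : lineEnergy l = some d := by rw [lineEnergy_eq l a b c d he, if_pos hb]
      have hF : findNext (l :: rest) = (some d, rest) := by
        simp [findNext, he, hb, PySem.List.pyGet?, PySem.List.pyIdx?]
      simp [hF, hE]
    · have hE : lineEnergy l = none := by
        simp only [lineEnergy]
        split
        · rename_i h
          simp at h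
          exact absurd ⟨h.1, h.2⟩ hc
        · rfl
      have hF : findNext (l :: rest) = findNext rest := by
        simp only [findNext]
        split
        · rename_i h
          simp at h
          exact absurd ⟨h.1, h.2⟩ hc
        · rfl
      simpa [hF, List.filterMap_cons, hE] using ih

lemma head?_tail_get {α : Type} (E : List α) :
    E.head? = E[0]? ∧ E.tail.head? = E[1]? ∧ E.tail.tail.head? = E[2]? := by
  rcases E with _ | ⟨a, _ | ⟨b, _ | ⟨c, E⟩⟩⟩ <;> simp

-- ===== VERDICT (by name: the statement is the Claim_ definition above) =====
theorem extract_lumo_extended_spec : Claim_equal_extract_lumo_extended := by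
  intro fc _
  unfold Spec_extract_lumo_extended
  simp only [extract_lumo_extended, extract_lumo_extended_alt, foldl_stepA]
  set ls := (PySem.Str.split? fc "\n").getD [] with hls
  obtain ⟨h1, h2⟩ := findNext_spec ls
  obtain ⟨h1', h2'⟩ := findNext_spec (findNext ls).2
  obtain ⟨h1'', _⟩ := findNext_spec (findNext (findNext ls).2).2
  obtain ⟨g0, g1, g2⟩ := head?_tail_get (ls.filterMap lineEnergy)
  simp only [Prod.mk.injEq]
  refine ⟨?_, ?_, ?_⟩
  · rw [h1]; exact g0.symm ▸ rfl
  · rw [h1', h2]; exact g1.symm ▸ rfl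
  · rw [h1'', h2', h2]; exact g2.symm ▸ rfl
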